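-- pv_equiv track=rewrite | github.com/ivolevy/algoritmos | buscaminas.py | verificarnorepe
-- ===== SOURCE A (Python) =====
-- def verificarnorepe(minas): #verifica que no hay minas repetidas
--     largo=int(len(minas)//2)#es la mitad porque agarrar de a duplas A1
--     ad=0 #adicional
--     repe=False #repetidas
--     for i in range(largo-1): #es uno menos porque no compara al principio contra si mismo
--         for j in range(1,largo):
--             if minas[i*2:i*2+2] == minas[j*2+ad:j*2+2+ad]:
--                 repe=True
--         largo=largo-1
--         ad=ad+2
--     return repe
-- ===== SOURCE B (Python) =====
-- def verificarnorepe(minas):  # sort the non-overlapping 2-char pairs, then scan adjacent elements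
--     pares = sorted(minas[i * 2:i * 2 + 2] for i in range(len(minas) // 2))
--     return any(x == y for x, y in zip(pares, pares[1:]))
-- ===== Notes on version B (the rewrite author's own statement) =====
-- stated objective: faster
-- what changed: Replaced A's triangular nested scan (with mutating largo/ad offsets) by: build the list of non-overlapping 2-char pairs once, sort it, and linearly scan for two equal adjacent pairs.
import Mathlib
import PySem

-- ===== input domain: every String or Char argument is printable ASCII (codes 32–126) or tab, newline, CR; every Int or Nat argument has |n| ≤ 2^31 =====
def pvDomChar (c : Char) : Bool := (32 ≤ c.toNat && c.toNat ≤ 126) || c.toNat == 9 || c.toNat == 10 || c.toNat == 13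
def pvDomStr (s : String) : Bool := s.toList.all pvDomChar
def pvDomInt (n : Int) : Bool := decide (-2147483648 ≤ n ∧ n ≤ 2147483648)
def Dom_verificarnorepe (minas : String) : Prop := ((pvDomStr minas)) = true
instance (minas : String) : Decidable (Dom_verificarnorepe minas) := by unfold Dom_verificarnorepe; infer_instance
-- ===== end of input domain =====

-- B replaces A's quadratic triangular scan with: sort the 2-char pairs, then one adjacent-equality pass.

-- ===== PORT A =====
-- one outer-loop iteration of A: state (largo, ad, repe); inner loop over range(1, largo)
def pvStepA (s : List Char) (st : Int × Int × Bool) (i : Int) : Int × Int × Bool :=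
  (st.1 - 1, st.2.1 + 2,
    (PySem.List.pyRange 1 st.1 1).foldl
      (fun repe j =>
        if PySem.List.slice s (some (i * 2)) (some (i * 2 + 2)) =
           PySem.List.slice s (some (j * 2 + st.2.1)) (some (j * 2 + 2 + st.2.1)) then true
        else repe)
      st.2.2)

def verificarnorepe (minas : String) : Bool :=
  let largo0 : Int := PySem.Int.floordiv (PySem.Str.len minas) 2
  ((PySem.List.pyRange 0 (largo0 - 1) 1).foldl (pvStepA minas.toList) (largo0, 0, false)).2.2

-- ===== PORT B =====
def verificarnorepe_alt (minas : String) : Bool :=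
  let pares := (PySem.List.pyRange 0 (PySem.Int.floordiv (PySem.Str.len minas) 2) 1).map
    (fun i => PySem.List.slice minas.toList (some (i * 2)) (some (i * 2 + 2)))
  let ps := @PySem.List.sorted (List Char) (List Char) Preorder.toLT LinearOrder.toDecidableLT
    pares (fun x => x) false
  (ps.zip (PySem.List.slice ps (some 1) none)).any (fun p => p.1 == p.2)

-- ===== PRECONDITION & SPEC =====
def Spec_verificarnorepe (minas : String) (out : Bool) : Prop := out = verificarnorepe_alt minas
instance (minas : String) (out : Bool) : Decidable (Spec_verificarnorepe minas out) := by unfold Spec_verificarnorepe; infer_instance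

-- ===== CLAIM (what is proved, stated in full; the proofs are below) =====
def Claim_equal_verificarnorepe : Prop := ∀ (minas : String), Dom_verificarnorepe minas → Spec_verificarnorepe minas (verificarnorepe minas)

-- ===== LEMMAS AND PROOFS =====

-- the i-th non-overlapping 2-char pair of s (both ports slice exactly this)
def pvPair (s : List Char) (i : Int) : List Char :=
  PySem.List.slice s (some (i * 2)) (some (i * 2 + 2))

-- generic: an accumulate-or loop 'if P x: acc = True'
theorem pv_foldl_ite_true {α : Type} (P : α → Prop) [DecidablePred P] (l : List α) (r : Bool) :
    l.foldl (fun acc x => if P x then true else acc) r = (r || l.any (fun x => decide (P x))) := by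
  induction l generalizing r with
  | nil => simp
  | cons a t ih =>
      rw [List.foldl_cons, ih]
      by_cases h : P a <;> simp [h]

-- A's outer loop, characterised: the flag ends true iff two pairs at positions a ≤ i < j < L coincide
theorem pv_loopA (s : List Char) (L : Int) :
    ∀ (n : Nat) (a : Int) (r : Bool), (L - 1 - a).toNat = n →
    (((PySem.List.pyRange a (L - 1) 1).foldl (pvStepA s) (L - a, 2 * a, r)).2.2 = true ↔
      (r = true ∨ ∃ i j : Int, a ≤ i ∧ i < j ∧ j < L ∧ pvPair s i = pvPair s j)) := by
  intro n
  induction n with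
  | zero =>
      intro a r h
      rw [PySem.List.pyRange_one_eq_nil (by omega)]
      simp only [List.foldl_nil]
      constructor
      · exact Or.inl
      · rintro (hr | ⟨i, j, hai, hij, hjL, -⟩)
        · exact hr
        · exfalso; omega
  | succ n ih =>
      intro a r h
      rw [PySem.List.pyRange_one_cons (by omega), List.foldl_cons]
      have hstep : pvStepA s (L - a, 2 * a, r) a =
          (L - (a + 1), 2 * (a + 1),
            r || ((PySem.List.pyRange 1 (L - a) 1).any (fun j =>
              decide (PySem.List.slice s (some (a * 2)) (some (a * 2 + 2)) =
                      PySem.List.slice s (some (j * 2 + 2 * a)) (some (j * 2 + 2 + 2 * a)))))) := by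
        unfold pvStepA
        refine Prod.ext (by ring) (Prod.ext (by ring) ?_)
        exact pv_foldl_ite_true _ _ _
      rw [hstep, ih (a + 1) _ (by omega)]
      simp only [Bool.or_eq_true, List.any_eq_true, decide_eq_true_eq,
        PySem.List.mem_pyRange_one]
      constructor
      · rintro ((hr | ⟨j, ⟨h1, h2⟩, hp⟩) | ⟨i, j, h1, h2, h3, hp⟩)
        · exact Or.inl hr
        · refine Or.inr ⟨a, a + j, le_refl _, by omega, by omega, ?_⟩
          rw [show j * 2 + 2 * a = (a + j) * 2 by ring,
              show j * 2 + 2 + 2 * a = (a + j) * 2 + 2 by ring] at hp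
          exact hp
        · exact Or.inr ⟨i, j, by omega, h2, h3, hp⟩
      · rintro (hr | ⟨i, j, h1, h2, h3, hp⟩)
        · exact Or.inl (Or.inl hr)
        · by_cases hi : i = a
          · subst hi
            refine Or.inl (Or.inr ⟨j - i, ⟨by omega, by omega⟩, ?_⟩)
            rw [show (j - i) * 2 + 2 * i = j * 2 by ring,
                show (j - i) * 2 + 2 + 2 * i = j * 2 + 2 by ring]
            exact hp
          · exact Or.inr ⟨i, j, by omega, h2, h3, hp⟩

theorem pv_A_iff (minas : String) :
    (verificarnorepe minas = true ↔
      ∃ i j : Int, 0 ≤ i ∧ i < j ∧ j < ((minas.toList.length / 2 : Nat) : Int) ∧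
        pvPair minas.toList i = pvPair minas.toList j) := by
  have h := pv_loopA minas.toList ((minas.toList.length / 2 : Nat) : Int)
    ((((minas.toList.length / 2 : Nat) : Int) - 1 - 0).toNat) 0 false rfl
  rw [sub_zero, mul_zero] at h
  unfold verificarnorepe
  have hlen : PySem.Int.floordiv (PySem.Str.len minas) 2 = ((minas.toList.length / 2 : Nat) : Int) := by
    simp [pysem]
  rw [hlen]
  simpa using h

-- a ≤-sorted list has two equal adjacent entries iff it has a duplicate at all
theorem pv_adj_nodup (ps : List (List Char)) (h : ps.Pairwise (· ≤ ·)) :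
    ((ps.zip ps.tail).any (fun p => p.1 == p.2) = true ↔ ¬ ps.Nodup) := by
  induction ps with
  | nil => simp
  | cons x t ih =>
      cases t with
      | nil => simp
      | cons y u =>
          have hxy : x ≤ y := (List.pairwise_cons.mp h).1 y (by simp)
          have ht : (y :: u).Pairwise (· ≤ ·) := (List.pairwise_cons.mp h).2
          by_cases hEq : x = y
          · subst hEq
            simp [List.zip]
          · have hxt : x ∉ y :: u := by
              intro hmem
              rcases List.mem_cons.mp hmem with h1 | h1
              · exact hEq h1
              · exact hEq (le_antisymm hxy ((List.pairwise_cons.mp ht).1 x h1))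
            have := ih ht
            simp only [List.tail_cons] at this ⊢
            simp [List.zip_cons_cons, List.any_cons, hEq, this, List.nodup_cons, hxt]

theorem pv_B_iff (minas : String) :
    (verificarnorepe_alt minas = true ↔
      ∃ i j : Int, 0 ≤ i ∧ i < j ∧ j < ((minas.toList.length / 2 : Nat) : Int) ∧
        pvPair minas.toList i = pvPair minas.toList j) := by
  unfold verificarnorepe_alt
  dsimp only
  have hlen : PySem.Int.floordiv (PySem.Str.len minas) 2 = ((minas.toList.length / 2 : Nat) : Int) := by
    simp [pysem]
  rw [hlen]
  set L : Int := ((minas.toList.length / 2 : Nat) : Int) with hL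
  set pares : List (List Char) :=
    (PySem.List.pyRange 0 L 1).map
      (fun i => PySem.List.slice minas.toList (some (i * 2)) (some (i * 2 + 2))) with hpares
  set ps : List (List Char) :=
    @PySem.List.sorted (List Char) (List Char) Preorder.toLT LinearOrder.toDecidableLT
      pares (fun x => x) false with hps
  have hperm : ps.Perm pares :=
    @PySem.List.sorted_perm (List Char) (List Char) Preorder.toLT LinearOrder.toDecidableLT
      pares (fun x => x) false
  have hpw : ps.Pairwise (· ≤ ·) := PySem.List.sorted_pairwise pares (fun x : List Char => x)
  rw [PySem.List.slice_from_one, pv_adj_nodup ps hpw, hperm.nodup_iff, hpares,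
    List.nodup_map_iff_inj_on (PySem.List.nodup_pyRange_one 0 L)]
  show (¬ ∀ i ∈ PySem.List.pyRange 0 L 1, ∀ j ∈ PySem.List.pyRange 0 L 1,
      pvPair minas.toList i = pvPair minas.toList j → i = j) ↔ _
  constructor
  · intro hninj
    push Not at hninj
    obtain ⟨i, hi, j, hj, hfe, hne⟩ := hninj
    rw [PySem.List.mem_pyRange_one] at hi hj
    rcases lt_trichotomy i j with hlt | heq | hgt
    · exact ⟨i, j, hi.1, hlt, hj.2, hfe⟩
    · exact absurd heq hne
    · exact ⟨j, i, hj.1, hgt, hi.2, hfe.symm⟩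
  · rintro ⟨i, j, h0, hij, hjL, hp⟩
    intro hinj
    have hi : i ∈ PySem.List.pyRange 0 L 1 := by rw [PySem.List.mem_pyRange_one]; omega
    have hj : j ∈ PySem.List.pyRange 0 L 1 := by rw [PySem.List.mem_pyRange_one]; omega
    exact absurd (hinj i hi j hj hp) (by omega)

-- ===== VERDICT (by name: the statement is the Claim_ definition above) =====
theorem verificarnorepe_spec : Claim_equal_verificarnorepe := by
  intro minas _
  unfold Spec_verificarnorepe
  rw [Bool.eq_iff_iff, pv_A_iff, pv_B_iff]
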